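-- pv_equiv track=rewrite | github.com/keith-murray/ctrnn-julia | src/generate_data.py | double_set_logic
-- ===== SOURCE A (Python) =====
-- def double_set_logic(candidate, left_over):
--     keys = candidate.keys()
--     result = (0,0)
--     for i in keys:
--         if sum(candidate[i]) != 0:
--             if candidate[i] == left_over[i]:
--                 result = candidate[i]
--             elif sum(candidate[i]) == sum(left_over[i]):
--                 result = (1,1)
--     return result
-- ===== SOURCE B (Python) =====
-- def double_set_logic(candidate, left_over):
--     # Reverse early-exit scan: the first qualifying key from the end is the
--     # one A's forward last-wins overwrite would have kept.
--     for i in reversed(candidate):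
--         c = candidate[i]
--         if sum(c) != 0:
--             t = left_over[i]
--             if c == t:
--                 return c
--             if sum(c) == sum(t):
--                 return (1, 1)
--     return (0, 0)
-- ===== Notes on version B (the rewrite author's own statement) =====
-- stated objective: alternative
-- what changed: Replaces A's forward full pass with last-wins overwriting of an accumulator by a reverse scan over the keys that returns at the first qualifying key (same key as A's last overwrite) and (0,0) if none qualifies.
import Mathlib
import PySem

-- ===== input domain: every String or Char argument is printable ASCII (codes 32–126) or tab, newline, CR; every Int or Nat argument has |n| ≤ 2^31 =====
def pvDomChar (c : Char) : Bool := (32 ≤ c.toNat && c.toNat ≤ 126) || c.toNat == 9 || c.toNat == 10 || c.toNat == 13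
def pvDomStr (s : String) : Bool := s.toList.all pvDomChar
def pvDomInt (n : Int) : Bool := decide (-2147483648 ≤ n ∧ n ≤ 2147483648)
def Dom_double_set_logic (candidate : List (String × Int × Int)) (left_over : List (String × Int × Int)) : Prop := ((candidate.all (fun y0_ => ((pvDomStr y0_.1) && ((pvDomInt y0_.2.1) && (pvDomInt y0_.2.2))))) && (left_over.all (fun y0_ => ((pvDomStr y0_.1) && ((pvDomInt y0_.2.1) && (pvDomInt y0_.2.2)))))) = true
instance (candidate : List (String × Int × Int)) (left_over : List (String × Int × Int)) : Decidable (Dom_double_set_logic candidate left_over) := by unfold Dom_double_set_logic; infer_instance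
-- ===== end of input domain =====

-- B replaces A's forward last-wins accumulator pass with an early-exit reverse scan (same values; alternative decomposition).


-- ===== PORT A =====
-- A iterates the dict's keys, overwriting `result` at every qualifying key (last wins).
-- left_over[i] (KeyError when missing) is ported as getD (0,0); Pre_ excludes missing keys.
def double_set_logic (candidate : List (String × Int × Int)) (left_over : List (String × Int × Int)) : Int × Int :=
  let cd := PySem.Dict.ofList candidate
  let lod := PySem.Dict.ofList left_over
  cd.items.foldl (fun result p =>
    if p.2.1 + p.2.2 ≠ 0 then
      let w := lod.getD p.1 (0, 0)
      if p.2 = w then p.2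
      else if p.2.1 + p.2.2 = w.1 + w.2 then (1, 1)
      else result
    else result) (0, 0)

-- ===== PORT B =====
-- B scans the keys in reverse and returns at the first qualifying key.
def double_set_logic_altGo (lod : PySem.Dict String (Int × Int)) : List (String × Int × Int) → Int × Int
  | [] => (0, 0)
  | p :: rest =>
    if p.2.1 + p.2.2 ≠ 0 then
      let w := lod.getD p.1 (0, 0)
      if p.2 = w then p.2
      else if p.2.1 + p.2.2 = w.1 + w.2 then (1, 1)
      else double_set_logic_altGo lod rest
    else double_set_logic_altGo lod rest

def double_set_logic_alt (candidate : List (String × Int × Int)) (left_over : List (String × Int × Int)) : Int × Int :=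
  double_set_logic_altGo (PySem.Dict.ofList left_over) (PySem.Dict.ofList candidate).items.reverse

-- ===== PRECONDITION & SPEC =====
-- Pre_ excludes exactly the inputs on which the Python A raises KeyError:
-- a candidate key with nonzero tuple sum that is absent from left_over.
def Pre_double_set_logic (candidate : List (String × Int × Int)) (left_over : List (String × Int × Int)) : Prop :=
  ∀ p ∈ (PySem.Dict.ofList candidate).items,
    p.2.1 + p.2.2 ≠ 0 → (PySem.Dict.ofList left_over).contains p.1 = true
instance (candidate : List (String × Int × Int)) (left_over : List (String × Int × Int)) : Decidable (Pre_double_set_logic candidate left_over) := by unfold Pre_double_set_logic; infer_instance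

def pvWitness_double_set_logic : (List (String × Int × Int)) × (List (String × Int × Int)) :=
  ([("a", 1, 2), ("b", 0, 0)], [("a", 1, 2)])

def Spec_double_set_logic (candidate : List (String × Int × Int)) (left_over : List (String × Int × Int)) (out : Int × Int) : Prop := out = double_set_logic_alt candidate left_over
instance (candidate : List (String × Int × Int)) (left_over : List (String × Int × Int)) (out : Int × Int) : Decidable (Spec_double_set_logic candidate left_over out) := by unfold Spec_double_set_logic; infer_instance

-- ===== CLAIM (what is proved, stated in full; the proofs are below) =====
def Claim_equal_double_set_logic : Prop := ∀ (candidate : List (String × Int × Int)) (left_over : List (String × Int × Int)), Dom_double_set_logic candidate left_over → Pre_double_set_logic candidate left_over → Spec_double_set_logic candidate left_over (double_set_logic candidate left_over)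

-- ===== LEMMAS AND PROOFS =====

-- The forward last-wins fold over l equals the early-exit reverse scan of l.
theorem foldl_eq_altGo_reverse (lod : PySem.Dict String (Int × Int)) (l : List (String × Int × Int)) :
    l.foldl (fun result p =>
      if p.2.1 + p.2.2 ≠ 0 then
        let w := lod.getD p.1 (0, 0)
        if p.2 = w then p.2
        else if p.2.1 + p.2.2 = w.1 + w.2 then (1, 1)
        else result
      else result) ((0 : Int), (0 : Int)) = double_set_logic_altGo lod l.reverse := by
  induction l using List.reverseRecOn with
  | nil => rfl
  | append_singleton l x ih =>
    rw [List.foldl_append, List.reverse_append]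
    simp only [List.foldl_cons, List.foldl_nil, List.reverse_cons, List.reverse_nil,
      List.nil_append, List.singleton_append]
    rw [double_set_logic_altGo]
    by_cases h1 : x.2.1 + x.2.2 ≠ 0
    · rw [if_pos h1, if_pos h1]
      by_cases h2 : x.2 = lod.getD x.1 (0, 0)
      · rw [if_pos h2, if_pos h2]
      · rw [if_neg h2, if_neg h2]
        by_cases h3 : x.2.1 + x.2.2 = (lod.getD x.1 (0, 0)).1 + (lod.getD x.1 (0, 0)).2
        · rw [if_pos h3, if_pos h3]
        · rw [if_neg h3, if_neg h3]; exact ih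
    · rw [if_neg h1, if_neg h1]; exact ih

-- ===== VERDICT (by name: the statement is the Claim_ definition above) =====
theorem double_set_logic_spec : Claim_equal_double_set_logic := by
  intro candidate left_over _ _
  unfold Spec_double_set_logic double_set_logic double_set_logic_alt
  exact foldl_eq_altGo_reverse _ _
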